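-- pv_equiv track=rewrite | github.com/lhysgithub/UAC-AD | codes/models/utils.py | get_anomaly_scopes
-- ===== SOURCE A (Python) =====
-- def get_anomaly_scopes(y_test):
--     index_list = []
--     lens_list = []
--     find = 0
--     count = 0
--     for i in range(len(y_test)):
--         if int(y_test[i]) == 1:
--             if find == 0:
--                 index_list.append(i)
--             find = 1
--             count += 1
--         elif find == 1:
--             find = 0
--             lens_list.append(count)
--             count = 0
--     return index_list, lens_list
-- ===== SOURCE B (Python) =====
-- def get_anomaly_scopes(y_test):
--     b = [int(x) == 1 for x in y_test]
--     prevs = [False] + b[:-1]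
--     starts = [i for i, (p, c) in enumerate(zip(prevs, b)) if c and not p]
--     ends = [i for i, (p, c) in enumerate(zip(prevs, b)) if p and not c]
--     lens_list = [e - s for s, e in zip(starts, ends)]
--     return starts, lens_list
-- ===== Notes on version B (the rewrite author's own statement) =====
-- stated objective: simpler
-- what changed: A's stateful scan with find/count flags is replaced by three stateless comprehensions: run starts and run ends are read off (previous, current) pairs of the boolean mask, and lengths are end-start differences via zip (which naturally drops the length of a run reaching the end of the input, as A does).
import Mathlib
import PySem

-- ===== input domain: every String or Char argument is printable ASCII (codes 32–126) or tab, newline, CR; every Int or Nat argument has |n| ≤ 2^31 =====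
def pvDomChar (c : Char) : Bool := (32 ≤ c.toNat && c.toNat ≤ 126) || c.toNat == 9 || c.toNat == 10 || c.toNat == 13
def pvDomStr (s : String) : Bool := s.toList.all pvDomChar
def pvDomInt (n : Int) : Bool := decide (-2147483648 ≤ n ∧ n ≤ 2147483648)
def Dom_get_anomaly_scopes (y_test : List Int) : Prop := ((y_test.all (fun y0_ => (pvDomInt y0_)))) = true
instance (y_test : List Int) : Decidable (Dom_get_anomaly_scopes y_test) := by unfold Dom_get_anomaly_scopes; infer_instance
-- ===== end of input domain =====

-- B replaces A's flag/counter state machine with three stateless comprehensions over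
-- (previous, current) pairs: run starts, run ends, lengths by subtraction (objective: simpler).

-- ===== PORT A =====
-- loop body of A's 'for i in range(len(y_test))'; y_test[i] is always in range here,
-- so pyGetD with default 0 is exact
def pvStepA (y_test : List Int) (st : List Int × List Int × Int × Int) (i : Int) :
    List Int × List Int × Int × Int :=
  let il := st.1
  let ll := st.2.1
  let find := st.2.2.1
  let count := st.2.2.2
  if PySem.List.pyGetD y_test i 0 == 1 then
    ((if find == 0 then il ++ [i] else il), ll, 1, count + 1)
  else if find == 1 then
    (il, ll ++ [count], 0, 0)
  else
    (il, ll, find, count)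

def get_anomaly_scopes (y_test : List Int) : List Int × List Int :=
  let r := (PySem.List.pyRange 0 (y_test.length : Int) 1).foldl (pvStepA y_test) ([], [], 0, 0)
  (r.1, r.2.1)

-- ===== PORT B =====
def get_anomaly_scopes_alt (y_test : List Int) : List Int × List Int :=
  let b := y_test.map (fun x => x == 1)
  let prevs := false :: PySem.List.slice b none (some (-1))   -- [False] + b[:-1]
  let pairs := PySem.List.enumerate (prevs.zip b) 0
  let starts := (pairs.filter (fun ic => ic.2.2 && !ic.2.1)).map (fun ic => ic.1)
  let ends := (pairs.filter (fun ic => ic.2.1 && !ic.2.2)).map (fun ic => ic.1)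
  let lens_list := (starts.zip ends).map (fun se => se.2 - se.1)
  (starts, lens_list)

-- ===== PRECONDITION & SPEC =====
def Spec_get_anomaly_scopes (y_test : List Int) (out : List Int × List Int) : Prop := out = get_anomaly_scopes_alt y_test
instance (y_test : List Int) (out : List Int × List Int) : Decidable (Spec_get_anomaly_scopes y_test out) := by unfold Spec_get_anomaly_scopes; infer_instance

-- ===== CLAIM (what is proved, stated in full; the proofs are below) =====
def Claim_equal_get_anomaly_scopes : Prop := ∀ (y_test : List Int), Dom_get_anomaly_scopes y_test → Spec_get_anomaly_scopes y_test (get_anomaly_scopes y_test)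

-- ===== LEMMAS AND PROOFS =====

-- reference recursion: (starts, lens, final flag, final count) of the run-scanner
def pvRuns : List Bool → Bool → Int → Int → List Int × List Int × Bool × Int
  | [], prev, _, c => ([], [], prev, c)
  | t :: bs, prev, i, c =>
    if t then
      let r := pvRuns bs true (i + 1) (c + 1)
      ((if prev then r.1 else i :: r.1), r.2.1, r.2.2)
    else if prev then
      let r := pvRuns bs false (i + 1) 0
      (r.1, c :: r.2.1, r.2.2)
    else
      pvRuns bs false (i + 1) c

-- run starts / run ends as boundary scans
def pvStarts : List Bool → Bool → Int → List Int
  | [], _, _ => []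
  | t :: bs, prev, i => if t && !prev then i :: pvStarts bs t (i + 1) else pvStarts bs t (i + 1)

def pvEnds : List Bool → Bool → Int → List Int
  | [], _, _ => []
  | t :: bs, prev, i => if prev && !t then i :: pvEnds bs t (i + 1) else pvEnds bs t (i + 1)

lemma pv_zip_dropLast_cons {α : Type} (t : α) (rest : List α) :
    ((t :: rest).dropLast).zip rest = (t :: rest.dropLast).zip rest := by
  cases rest <;> simp

lemma pv_starts_eq (bs : List Bool) : ∀ (prev : Bool) (i : Int),
    ((PySem.List.enumerate ((prev :: bs.dropLast).zip bs) i).filter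
        (fun ic => ic.2.2 && !ic.2.1)).map (fun ic => ic.1) = pvStarts bs prev i := by
  induction bs with
  | nil => intro prev i; simp [pvStarts]
  | cons t rest ih =>
    intro prev i
    have hz : (prev :: (t :: rest).dropLast).zip (t :: rest)
        = (prev, t) :: ((t :: rest.dropLast).zip rest) := by
      rw [List.zip_cons_cons, pv_zip_dropLast_cons]
    rw [hz, PySem.List.enumerate_cons]
    cases t <;> cases prev <;> simp [pvStarts, ih]

lemma pv_ends_eq (bs : List Bool) : ∀ (prev : Bool) (i : Int),
    ((PySem.List.enumerate ((prev :: bs.dropLast).zip bs) i).filter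
        (fun ic => ic.2.1 && !ic.2.2)).map (fun ic => ic.1) = pvEnds bs prev i := by
  induction bs with
  | nil => intro prev i; simp [pvEnds]
  | cons t rest ih =>
    intro prev i
    have hz : (prev :: (t :: rest).dropLast).zip (t :: rest)
        = (prev, t) :: ((t :: rest.dropLast).zip rest) := by
      rw [List.zip_cons_cons, pv_zip_dropLast_cons]
    rw [hz, PySem.List.enumerate_cons]
    cases t <;> cases prev <;> simp [pvEnds, ih]

lemma pv_starts_runs (bs : List Bool) : ∀ (prev : Bool) (i c : Int),
    pvStarts bs prev i = (pvRuns bs prev i c).1 := by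
  induction bs with
  | nil => intro prev i c; simp [pvStarts, pvRuns]
  | cons t rest ih =>
    intro prev i c
    cases t <;> cases prev <;> simp [pvStarts, pvRuns] <;> exact ih _ _ _

lemma pv_lens_runs (bs : List Bool) : ∀ (prev : Bool) (i c : Int), (prev = false → c = 0) →
    (((if prev then [i - c] else []) ++ pvStarts bs prev i).zip (pvEnds bs prev i)).map
        (fun se => se.2 - se.1) = (pvRuns bs prev i c).2.1 := by
  induction bs with
  | nil =>
    intro prev i c _
    cases prev <;> simp [pvStarts, pvEnds, pvRuns]
  | cons t rest ih =>
    intro prev i c hc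
    cases t
    · cases prev
      · -- t = false, prev = false: pass-through (count carried unchanged, as in A)
        simpa [pvStarts, pvEnds, pvRuns] using ih false (i + 1) c hc
      · -- t = false, prev = true: run closes here, length c = i - (i - c)
        have h1 : i - (i - c) = c := by ring
        have := ih false (i + 1) 0 (fun _ => rfl)
        simp only [pvStarts, pvEnds, pvRuns] at *
        simpa [h1] using this
    · cases prev
      · -- t = true, prev = false: run opens at i; c = 0 so i = (i+1) - (c+1)
        have hc0 : c = 0 := hc rfl
        have := ih true (i + 1) (c + 1) (by simp)
        simp only [pvStarts, pvEnds, pvRuns] at *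
        have h2 : i + 1 - (c + 1) = i := by omega
        simpa [hc0] using this
      · -- t = true, prev = true: run continues, pending start i - c = (i+1) - (c+1)
        have := ih true (i + 1) (c + 1) (by simp)
        simp only [pvStarts, pvEnds, pvRuns] at *
        have h2 : i + 1 - (c + 1) = i - c := by ring
        rw [h2] at this
        simpa using this

-- characterization of A's fold from any reachable state
lemma pv_A_loop (y : List Int) : ∀ (tail : List Int) (a : Nat), y.drop a = tail →
    ∀ (il ll : List Int) (prev : Bool) (c : Int),
    (PySem.List.pyRange (a : Int) (y.length : Int) 1).foldl (pvStepA y)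
        (il, ll, (if prev then (1 : Int) else 0), c)
      = (il ++ (pvRuns (tail.map (fun x => x == 1)) prev (a : Int) c).1,
         ll ++ (pvRuns (tail.map (fun x => x == 1)) prev (a : Int) c).2.1,
         (if (pvRuns (tail.map (fun x => x == 1)) prev (a : Int) c).2.2.1 then (1 : Int) else 0),
         (pvRuns (tail.map (fun x => x == 1)) prev (a : Int) c).2.2.2) := by
  intro tail
  induction tail with
  | nil =>
    intro a h il ll prev c
    have hlen : y.length ≤ a := by
      have := List.drop_eq_nil_iff.mp h
      omega
    rw [PySem.List.pyRange_one_eq_nil (by exact_mod_cast hlen)]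
    simp [pvRuns]
  | cons x tail' ih =>
    intro a h il ll prev c
    have hlt : a < y.length := by
      by_contra hge
      rw [List.drop_eq_nil_iff.mpr (by omega)] at h
      simp at h
    have hx : y[a] = x := by
      have : (y.drop a)[0]'(by rw [h]; simp) = x := by simp [h]
      simpa using this
    have hget : PySem.List.pyGetD y (a : Int) 0 = x := by
      rw [PySem.List.pyGetD_natCast]
      simp [List.getD_eq_getElem?_getD, hlt, hx]
    rw [PySem.List.pyRange_one_cons (by exact_mod_cast hlt)]
    rw [List.foldl_cons]
    have hdrop : y.drop (a + 1) = tail' := by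
      have : (y.drop a).drop 1 = tail'.drop 0 := by rw [h]; rfl
      simpa [List.drop_drop, Nat.add_comm] using this
    have hcast : (a : Int) + 1 = ((a + 1 : Nat) : Int) := by push_cast; ring
    by_cases hx1 : x = 1
    · -- current element is 1
      cases prev
      · -- find = 0: append a, find := 1, count := c + 1
        have hstep : pvStepA y (il, ll, (0 : Int), c) (a : Int)
            = (il ++ [(a : Int)], ll, 1, c + 1) := by
          simp [pvStepA, hget, hx1]
        simp only [Bool.false_eq_true, if_false] at hstep ⊢
        rw [hstep, hcast]
        exact (ih (a + 1) hdrop (il ++ [(a : Int)]) ll true (c + 1)).trans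
          (by simp [pvRuns, hx1, ← hcast])
      · -- find = 1: no append, count := c + 1
        have hstep : pvStepA y (il, ll, (1 : Int), c) (a : Int)
            = (il, ll, 1, c + 1) := by
          simp [pvStepA, hget, hx1]
        simp only [if_pos trivial] at hstep ⊢
        rw [hstep, hcast]
        exact (ih (a + 1) hdrop il ll true (c + 1)).trans
          (by simp [pvRuns, hx1, ← hcast])
    · -- current element is not 1
      cases prev
      · -- find = 0: state unchanged
        have hstep : pvStepA y (il, ll, (0 : Int), c) (a : Int)
            = (il, ll, 0, c) := by
          simp [pvStepA, hget, hx1]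
        simp only [Bool.false_eq_true, if_false] at hstep ⊢
        rw [hstep, hcast]
        have := ih (a + 1) hdrop il ll false c
        simp only [Bool.false_eq_true, if_false] at this
        rw [this]
        simp [pvRuns, hx1, ← hcast]
      · -- find = 1: run closes, append count
        have hstep : pvStepA y (il, ll, (1 : Int), c) (a : Int)
            = (il, ll ++ [c], 0, 0) := by
          simp [pvStepA, hget, hx1]
        simp only [if_pos trivial] at hstep ⊢
        rw [hstep, hcast]
        have := ih (a + 1) hdrop il (ll ++ [c]) false 0
        simp only [Bool.false_eq_true, if_false] at this
        rw [this]
        simp [pvRuns, hx1, ← hcast]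

lemma pv_slice_dropLast (xs : List Bool) :
    PySem.List.slice xs none (some (-1)) = xs.dropLast := by
  simp only [PySem.List.slice, Int.reduceNeg, Order.lt_one_iff, PySem.List.clampIdx_neg_ofNat,
    tsub_zero, List.drop_zero]
  rw [List.dropLast_eq_take]

-- ===== VERDICT (by name: the statement is the Claim_ definition above) =====
theorem get_anomaly_scopes_spec : Claim_equal_get_anomaly_scopes := by
  intro y _
  show get_anomaly_scopes y = get_anomaly_scopes_alt y
  have hA := pv_A_loop y y 0 (by simp) [] [] false 0
  simp only [Nat.cast_zero, Bool.false_eq_true, if_false, List.nil_append] at hA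
  simp only [get_anomaly_scopes, get_anomaly_scopes_alt, pv_slice_dropLast]
  rw [hA]
  rw [pv_starts_eq (y.map (fun x => x == 1)) false 0, pv_ends_eq (y.map (fun x => x == 1)) false 0]
  have hlens := pv_lens_runs (y.map (fun x => x == 1)) false 0 0 (fun _ => rfl)
  simp only [Bool.false_eq_true, if_false, List.nil_append] at hlens
  rw [hlens, pv_starts_runs (y.map (fun x => x == 1)) false 0 0]
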